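-- pv_equiv track=rewrite | github.com/YoByron/trading | scripts/ralph_loop.py | get_failing_test_details
-- ===== SOURCE A (Python) =====
-- def get_failing_test_details(test_output: str) -> str:
--     """Extract relevant failure details from test output."""
--     lines = test_output.split("\n")
--     relevant_lines = []
--     capture = False
--
--     for line in lines:
--         if "FAILED" in line or "ERROR" in line or "assert" in line.lower():
--             capture = True
--         if capture:
--             relevant_lines.append(line)
--             if len(relevant_lines) > 50:  # Limit context
--                 break
--
--     return "\n".join(relevant_lines) if relevant_lines else test_output[:2000]
-- ===== SOURCE B (Python) =====
-- def get_failing_test_details(test_output: str) -> str: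
--     """Extract relevant failure details from test output."""
--     hits = [p for p in (test_output.find("FAILED"),
--                         test_output.find("ERROR"),
--                         test_output.lower().find("assert")) if p != -1]
--     if not hits:
--         return test_output[:2000]
--     first = min(hits)
--     start = test_output.rfind("\n", 0, first) + 1
--     return "\n".join(test_output[start:].split("\n")[:51])
-- ===== Notes on version B (the rewrite author's own statement) =====
-- stated objective: alternative
-- what changed: Detection no longer iterates over lines at all: B finds the markers by whole-text substring search (str.find on the text, str.lower().find for 'assert'), takes the earliest hit, maps it to its line start with rfind('\n',0,hit)+1, and joins the first 51 lines of that suffix; A instead scans the line list with a capture flag and an accumulator.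
import Mathlib
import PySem

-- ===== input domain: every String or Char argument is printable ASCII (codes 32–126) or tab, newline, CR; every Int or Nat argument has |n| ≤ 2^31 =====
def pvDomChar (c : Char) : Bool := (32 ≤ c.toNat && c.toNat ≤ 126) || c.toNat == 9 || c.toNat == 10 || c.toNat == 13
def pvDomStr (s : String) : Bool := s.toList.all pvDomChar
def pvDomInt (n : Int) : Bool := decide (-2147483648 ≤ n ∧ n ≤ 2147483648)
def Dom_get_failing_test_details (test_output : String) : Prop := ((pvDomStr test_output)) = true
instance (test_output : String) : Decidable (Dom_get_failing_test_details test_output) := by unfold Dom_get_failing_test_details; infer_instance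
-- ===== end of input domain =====

-- B detects the failure markers by whole-text substring search (find / lower().find / rfind on raw
-- character offsets) instead of A's per-line capture-flag scan; alternative algorithm, not claimed faster.

-- ===== PORT A =====
-- the trigger condition: "FAILED" in line or "ERROR" in line or "assert" in line.lower()
def pvTrigger (line : String) : Bool :=
  PySem.Str.isIn "FAILED" line || PySem.Str.isIn "ERROR" line ||
    PySem.Str.isIn "assert" (PySem.Str.lower line)

-- A's for-loop over lines with the capture flag, the accumulator and the break at > 50
def pvGoA : List String → List String → Bool → List String
  | [], acc, _ => acc
  | l :: rest, acc, capture =>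
      let capture := if pvTrigger l then true else capture
      if capture then
        let acc' := acc ++ [l]
        if acc'.length > 50 then acc' else pvGoA rest acc' capture
      else pvGoA rest acc capture

def get_failing_test_details (test_output : String) : String :=
  let lines := (PySem.Str.split? test_output "\n").getD []
  let relevant_lines := pvGoA lines [] false
  if relevant_lines ≠ [] then PySem.Str.join "\n" relevant_lines
  else PySem.Str.slice test_output none (some 2000)

-- ===== PORT B =====
-- hits = [p for p in (t.find("FAILED"), t.find("ERROR"), t.lower().find("assert")) if p != -1]
-- if not hits: return t[:2000]
-- start = t.rfind("\n", 0, min(hits)) + 1 ; return "\n".join(t[start:].split("\n")[:51])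
def get_failing_test_details_alt (test_output : String) : String :=
  let hits := ([PySem.Str.find test_output "FAILED",
                PySem.Str.find test_output "ERROR",
                PySem.Str.find (PySem.Str.lower test_output) "assert"]).filter (· != -1)
  if hits = [] then PySem.Str.slice test_output none (some 2000)
  else
    let first := (PySem.List.min? hits (fun x => x)).getD 0
    let start := PySem.Str.rfindFrom test_output "\n" 0 (some first) + 1
    let tail := PySem.Str.slice test_output (some start) none
    PySem.Str.join "\n" (PySem.List.slice ((PySem.Str.split? tail "\n").getD []) none (some 51))

-- ===== PRECONDITION & SPEC =====
def Spec_get_failing_test_details (test_output : String) (out : String) : Prop :=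
  out = get_failing_test_details_alt test_output
instance (test_output : String) (out : String) :
    Decidable (Spec_get_failing_test_details test_output out) := by
  unfold Spec_get_failing_test_details; infer_instance

-- ===== CLAIM =====
def Claim_equal_get_failing_test_details : Prop :=
  ∀ (test_output : String), Dom_get_failing_test_details test_output →
    Spec_get_failing_test_details test_output (get_failing_test_details test_output)

-- ===== LEMMAS AND PROOFS =====

def pvSplit (c : Char) : List Char → List (List Char)
  | [] => [[]]
  | x :: r => if x = c then [] :: pvSplit c r else (pvSplit c r).modifyHead (x :: ·)

def pvLastIdx (c : Char) : List Char → Int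
  | [] => -1
  | x :: r => if pvLastIdx c r ≠ -1 then 1 + pvLastIdx c r else if x = c then 0 else -1

theorem pv_find_go (sub : List Char) : ∀ (l : List Char) (k : Nat),
    PySem.Chars.find.go sub l k =
      if PySem.Chars.find l sub = -1 then -1 else (k : Int) + PySem.Chars.find l sub := by
  intro l
  induction l with
  | nil =>
    intro k
    by_cases h : sub.isEmpty
    · have h0 : PySem.Chars.find [] sub = 0 := by
        show (if sub.isEmpty then ((0:Nat):Int) else -1) = 0; simp [h]
      show (if sub.isEmpty then ((k:Nat):Int) else -1) = _
      simp [h, h0]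
    · have h0 : PySem.Chars.find [] sub = -1 := by
        show (if sub.isEmpty then ((0:Nat):Int) else -1) = -1; simp [h]
      show (if sub.isEmpty then ((k:Nat):Int) else -1) = _
      simp [h, h0]
  | cons x r ih =>
    intro k
    show (if sub.isPrefixOf (x :: r) then ((k:Nat) : Int) else PySem.Chars.find.go sub r (k+1)) = _
    have hf : PySem.Chars.find (x :: r) sub =
        (if sub.isPrefixOf (x :: r) then ((0:Nat) : Int) else PySem.Chars.find.go sub r (0+1)) := rfl
    by_cases hp : sub.isPrefixOf (x :: r)
    · simp [hf, hp]
    · rw [hf]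
      simp only [hp, if_false]
      rw [ih (k+1), ih (0+1)]
      have hge := PySem.Chars.neg_one_le_find r sub
      by_cases h : PySem.Chars.find r sub = -1 <;>
        simp [h] <;> push_cast <;> omega

theorem pv_find_cons (x : Char) (l sub : List Char) :
    PySem.Chars.find (x :: l) sub =
      if sub.isPrefixOf (x :: l) then 0
      else if PySem.Chars.find l sub = -1 then -1 else 1 + PySem.Chars.find l sub := by
  show (if sub.isPrefixOf (x :: l) then ((0:Nat) : Int) else PySem.Chars.find.go sub l (0+1)) = _
  by_cases hp : sub.isPrefixOf (x :: l)
  · simp [hp]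
  · simp only [hp, if_false]
    rw [pv_find_go]
    by_cases h : PySem.Chars.find l sub = -1 <;> simp [h]

theorem pv_find_nil {sub : List Char} (h : sub ≠ []) : PySem.Chars.find [] sub = -1 := by
  show (if sub.isEmpty then ((0:Nat):Int) else -1) = -1
  simp [List.isEmpty_iff, h]

theorem pv_singleton_prefix (c : Char) (l : List Char) : [c] <+: l ↔ l.head? = some c := by
  cases l with
  | nil => simp
  | cons x r => simp [List.cons_prefix_cons, eq_comm]

theorem pv_prefix_sep {c : Char} {sub : List Char} (hc : c ∉ sub) (a b : List Char) :
    sub <+: (a ++ c :: b) ↔ sub <+: a := by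
  induction sub generalizing a with
  | nil => simp
  | cons s ss ih =>
    have hc1 : c ≠ s := fun h => hc (h ▸ List.mem_cons_self)
    have hc2 : c ∉ ss := fun h => hc (List.mem_cons_of_mem _ h)
    cases a with
    | nil =>
      simp only [List.nil_append, List.cons_prefix_cons, List.prefix_nil]
      constructor
      · rintro ⟨h1, -⟩; exact absurd h1.symm hc1
      · rintro h; simp at h
    | cons x a' =>
      simp only [List.cons_append, List.cons_prefix_cons]
      rw [ih hc2 a']

theorem pv_find_sep {c : Char} {sub : List Char} (hc : c ∉ sub) (hne : sub ≠ [])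
    (a b : List Char) :
    PySem.Chars.find (a ++ c :: b) sub =
      if PySem.Chars.find a sub ≠ -1 then PySem.Chars.find a sub
      else if PySem.Chars.find b sub = -1 then -1
      else (a.length : Int) + 1 + PySem.Chars.find b sub := by
  induction a with
  | nil =>
    rw [List.nil_append, pv_find_cons]
    have hp : ¬ sub.isPrefixOf (c :: b) := by
      rw [List.isPrefixOf_iff_prefix]
      cases sub with
      | nil => exact absurd rfl hne
      | cons s ss =>
        rw [List.cons_prefix_cons]
        rintro ⟨rfl, -⟩
        exact hc List.mem_cons_self
    rw [pv_find_nil hne]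
    simp [hp]
  | cons x a' ih =>
    rw [List.cons_append, pv_find_cons, ih, pv_find_cons (sub := sub) (x := x) (l := a')]
    have hpre : sub.isPrefixOf (x :: (a' ++ c :: b)) = sub.isPrefixOf (x :: a') := by
      rw [Bool.eq_iff_iff, List.isPrefixOf_iff_prefix, List.isPrefixOf_iff_prefix]
      exact pv_prefix_sep hc (x :: a') b
    rw [hpre]
    have h1 := PySem.Chars.neg_one_le_find a' sub
    have h2 := PySem.Chars.neg_one_le_find b sub
    by_cases hp : sub.isPrefixOf (x :: a') <;>
      by_cases ha : PySem.Chars.find a' sub = -1 <;>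
      by_cases hb : PySem.Chars.find b sub = -1 <;>
      simp [hp, ha, hb] <;> push_cast <;> omega

theorem pv_find_lt {t sub : List Char} (hne : sub ≠ []) (h : PySem.Chars.find t sub ≠ -1) :
    0 ≤ PySem.Chars.find t sub ∧ PySem.Chars.find t sub < (t.length : Int) := by
  have h0 : 0 ≤ PySem.Chars.find t sub := by
    have := PySem.Chars.neg_one_le_find t sub; omega
  refine ⟨h0, ?_⟩
  obtain ⟨hpre, -⟩ := PySem.Chars.find_spec h0
  have hlen : sub.length ≤ (t.drop (PySem.Chars.find t sub).toNat).length := hpre.length_le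
  have hsub : 0 < sub.length := List.length_pos_iff.mpr hne
  simp only [List.length_drop] at hlen
  omega
theorem pv_lastIdx_ge (c : Char) (l : List Char) : -1 ≤ pvLastIdx c l := by
  induction l with
  | nil => simp [pvLastIdx]
  | cons x r ih =>
    simp only [pvLastIdx]
    split_ifs <;> omega

theorem pv_lastIdx_append_single (c : Char) (l : List Char) (x : Char) :
    pvLastIdx c (l ++ [x]) = if x = c then (l.length : Int) else pvLastIdx c l := by
  induction l with
  | nil => simp [pvLastIdx]
  | cons y r ih =>
    have hge := pv_lastIdx_ge c r
    simp only [List.cons_append, pvLastIdx, ih, List.length_cons]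
    by_cases hx : x = c
    · simp only [hx, if_true]
      have hr : ¬ ((r.length : Int) = -1) := by omega
      split_ifs <;> push_cast <;> omega
    · simp [hx]

theorem pv_rfind_go (s : List Char) (c : Char) : ∀ n : Nat,
    PySem.Chars.rfind.go s [c] n = pvLastIdx c (s.take (n+1)) := by
  intro n
  induction n with
  | zero =>
    show (if List.isPrefixOf [c] (s.drop 0) then ((0:Nat):Int) else -1) = _
    cases s with
    | nil => simp [pvLastIdx, List.isPrefixOf]
    | cons x r =>
      rw [List.drop_zero, List.take_succ_cons, List.take_zero]
      have hpre : List.isPrefixOf [c] (x :: r) = (c == x) := by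
        simp [List.isPrefixOf]
      by_cases hx : x = c <;> simp [hpre, pvLastIdx, hx] <;> simp [Ne.symm hx]
  | succ n ih =>
    show (if List.isPrefixOf [c] (s.drop (n+1)) then ((n+1:Nat):Int)
          else PySem.Chars.rfind.go s [c] n) = _
    have hhead : (List.isPrefixOf [c] (s.drop (n+1)) = true) ↔ s[n+1]? = some c := by
      rw [List.isPrefixOf_iff_prefix, pv_singleton_prefix, List.head?_drop]
    by_cases hn : n + 1 < s.length
    · have hget : s[n+1]? = some s[n+1] := List.getElem?_eq_getElem hn
      have htake : s.take (n+1+1) = s.take (n+1) ++ [s[n+1]] := by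
        rw [List.take_succ, hget]; rfl
      rw [htake, pv_lastIdx_append_single, List.length_take_of_le (by omega)]
      by_cases hc : s[n+1] = c
      · have : List.isPrefixOf [c] (s.drop (n+1)) = true := by
          rw [hhead, hget, hc]
        simp [this, hc]
      · have : ¬ (List.isPrefixOf [c] (s.drop (n+1)) = true) := by
          rw [hhead, hget]; simp [hc]
        simp only [Bool.not_eq_true] at this
        simp [this, hc, ih]
    · have hdrop : s.drop (n+1) = [] := List.drop_eq_nil_of_le (by omega)
      have htake2 : s.take (n+1+1) = s.take (n+1) := by
        rw [List.take_of_length_le (by omega), List.take_of_length_le (by omega)]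
      rw [hdrop, htake2]
      simp [List.isPrefixOf, ih]

theorem pv_rfind_single (s : List Char) (c : Char) :
    PySem.Chars.rfind s [c] = pvLastIdx c s := by
  show PySem.Chars.rfind.go s [c] s.length = _
  rw [pv_rfind_go, List.take_of_length_le (by omega)]

theorem pv_lastIdx_neg {c : Char} {s : List Char} (h : c ∉ s) : pvLastIdx c s = -1 := by
  induction s with
  | nil => simp [pvLastIdx]
  | cons x r ih =>
    have hx : ¬ (x = c) := fun hh => h (hh ▸ List.mem_cons_self)
    have hr := ih (fun hh => h (List.mem_cons_of_mem _ hh))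
    simp [pvLastIdx, hr, hx]

theorem pv_lastIdx_sep (c : Char) (a u : List Char) :
    pvLastIdx c (a ++ c :: u) =
      if pvLastIdx c u ≠ -1 then (a.length : Int) + 1 + pvLastIdx c u
      else (a.length : Int) := by
  induction a with
  | nil =>
    simp only [List.nil_append, pvLastIdx, List.length_nil]
    split_ifs <;> push_cast <;> omega
  | cons x a' ih =>
    have hge := pv_lastIdx_ge c u
    simp only [List.cons_append, pvLastIdx, ih, List.length_cons]
    split_ifs <;> push_cast <;> omega
theorem pv_splitOn_go (c : Char) : ∀ (l : List Char) (fuel : Nat) (cur : List Char)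
    (acc : List (List Char)), l.length < fuel →
    PySem.Chars.splitOn.go [c] fuel l cur acc =
      acc.reverse ++ (pvSplit c l).modifyHead (cur.reverse ++ ·) := by
  intro l
  induction l with
  | nil =>
    intro fuel cur acc hf
    cases fuel with
    | zero => omega
    | succ f =>
      show (cur.reverse :: acc).reverse = _
      simp [pvSplit]
  | cons x rest ih =>
    intro fuel cur acc hf
    cases fuel with
    | zero => omega
    | succ f =>
      show (if List.isPrefixOf [c] (x :: rest) then
              PySem.Chars.splitOn.go [c] f (List.drop 1 (x :: rest)) [] (cur.reverse :: acc)
            else PySem.Chars.splitOn.go [c] f rest (x :: cur) acc) = _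
      have hpre : List.isPrefixOf [c] (x :: rest) = (c == x) := by simp [List.isPrefixOf]
      by_cases hx : x = c
      · have hb : List.isPrefixOf [c] (x :: rest) = true := by simp [hpre, hx]
        rw [if_pos hb, List.drop_one, List.tail_cons,
          ih f [] (cur.reverse :: acc) (by simp at hf ⊢; omega)]
        have hid : List.modifyHead (fun x : List Char => x) (pvSplit c rest) = pvSplit c rest := by
          rw [show (fun x : List Char => x) = id from rfl, List.modifyHead_id]; rfl
        simp [pvSplit, hx, hid]
      · have hb : ¬ (List.isPrefixOf [c] (x :: rest) = true) := by
          simp [hpre]; exact fun hh => hx hh.symm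
        simp only [Bool.not_eq_true] at hb
        rw [if_neg (by simp [hb]), ih f (x :: cur) acc (by simp at hf ⊢; omega)]
        simp only [pvSplit, if_neg hx, List.modifyHead_modifyHead]
        have hfun : (fun x_1 => (x :: cur).reverse ++ x_1) =
            ((fun y => cur.reverse ++ y) ∘ fun y => x :: y) := by
          funext ys; simp
        rw [hfun]
theorem pv_modifyHead_self' (l : List (List Char)) :
    List.modifyHead (fun x : List Char => x) l = l := by cases l <;> rfl

theorem pv_splitOn_single (s : List Char) (c : Char) :
    PySem.Chars.splitOn s [c] = pvSplit c s := by
  show PySem.Chars.splitOn.go [c] (s.length + 1) s [] [] = _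
  rw [pv_splitOn_go c s (s.length + 1) [] [] (by omega)]
  simp [pv_modifyHead_self']

theorem pvSplit_no_sep {c : Char} {s : List Char} (h : c ∉ s) : pvSplit c s = [s] := by
  induction s with
  | nil => rfl
  | cons x r ih =>
    have hx : ¬ (x = c) := fun hh => h (hh ▸ List.mem_cons_self)
    have hr := ih (fun hh => h (List.mem_cons_of_mem _ hh))
    simp [pvSplit, hx, hr]

theorem pvSplit_sep {c : Char} {a : List Char} (h : c ∉ a) (b : List Char) :
    pvSplit c (a ++ c :: b) = a :: pvSplit c b := by
  induction a with
  | nil => simp [pvSplit]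
  | cons x a' ih =>
    have hx : ¬ (x = c) := fun hh => h (hh ▸ List.mem_cons_self)
    have ha' := ih (fun hh => h (List.mem_cons_of_mem _ hh))
    simp [pvSplit, hx, ha']

theorem pv_rfindFrom_eval (t : List Char) (c : Char) (p : Int)
    (h0 : 0 ≤ p) (hl : p ≤ (t.length : Int)) :
    PySem.Chars.rfindFrom t [c] 0 (some p) = pvLastIdx c (t.take p.toNat) := by
  have h1 : ¬ ((t.length : Int) < p) := by omega
  have h2 : ¬ (p < (0:Int)) := by omega
  have h3 : ¬ ((0:Int) < 0) := by omega
  simp only [PySem.Chars.rfindFrom, h1, h2, h3, if_false]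
  rw [show (Int.toNat 0) = 0 from rfl, List.drop_zero, pv_rfind_single]
  have hge := pv_lastIdx_ge c (t.take p.toNat)
  by_cases h5 : pvLastIdx c (t.take p.toNat) = -1 <;> simp [h5]
def pvTrigL (cs : List Char) : Bool :=
  PySem.Chars.isIn "FAILED".toList cs || PySem.Chars.isIn "ERROR".toList cs ||
    PySem.Chars.isIn "assert".toList (PySem.Chars.lower cs)

def pvHitsL (t : List Char) : List Int :=
  [PySem.Chars.find t "FAILED".toList, PySem.Chars.find t "ERROR".toList,
   PySem.Chars.find (PySem.Chars.lower t) "assert".toList].filter (· != -1)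

def pvMinL (l : List Int) : Int := (PySem.List.min? l (fun x => x)).getD 0

theorem pv_hits_nil_iff (t : List Char) :
    pvHitsL t = [] ↔
      (PySem.Chars.find t "FAILED".toList = -1 ∧ PySem.Chars.find t "ERROR".toList = -1 ∧
        PySem.Chars.find (PySem.Chars.lower t) "assert".toList = -1) := by
  simp only [pvHitsL, List.filter_eq_nil_iff]
  constructor
  · intro h
    have h1 := h _ (List.mem_cons_self)
    have h2 := h _ (List.mem_cons_of_mem _ (List.mem_cons_self))
    have h3 := h _ (List.mem_cons_of_mem _ (List.mem_cons_of_mem _ (List.mem_cons_self)))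
    simp only [bne_iff_ne, ne_eq, not_not] at h1 h2 h3
    exact ⟨h1, h2, h3⟩
  · rintro ⟨h1, h2, h3⟩ x hx
    simp only [List.mem_cons, List.not_mem_nil, or_false] at hx
    rcases hx with rfl | rfl | rfl <;> simp only [bne_iff_ne, ne_eq, not_not] <;>
      first | exact h1 | exact h2 | exact h3

theorem pv_trig_false_iff (t : List Char) :
    pvTrigL t = false ↔
      (PySem.Chars.find t "FAILED".toList = -1 ∧ PySem.Chars.find t "ERROR".toList = -1 ∧
        PySem.Chars.find (PySem.Chars.lower t) "assert".toList = -1) := by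
  simp only [pvTrigL, PySem.Chars.isIn, Bool.or_eq_false_iff, bne_eq_false_iff_eq]
  tauto

theorem pv_hits_nil_iff_trig (t : List Char) : pvHitsL t = [] ↔ pvTrigL t = false := by
  rw [pv_hits_nil_iff, pv_trig_false_iff]

theorem pv_lower_sep (a b : List Char) :
    PySem.Chars.lower (a ++ '\n' :: b) =
      PySem.Chars.lower a ++ '\n' :: PySem.Chars.lower b := by
  simp only [PySem.Chars.lower, List.map_append, List.map_cons]
  rfl

theorem pv_filter_shift (k : Int) (hk : 0 ≤ k) : ∀ l : List Int, (∀ x ∈ l, -1 ≤ x) →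
    ((l.map fun x => if x = -1 then (-1 : Int) else k + x).filter (· != -1)) =
      (l.filter (· != -1)).map (fun x => k + x) := by
  intro l
  induction l with
  | nil => simp
  | cons x r ih =>
    intro h
    have hx := h x List.mem_cons_self
    have hr := ih (fun y hy => h y (List.mem_cons_of_mem _ hy))
    by_cases h1 : x = -1
    · simp [h1, hr]
    · have h2 : ¬ (k + x = -1) := by omega
      simp [h1, h2, hr]

theorem pv_foldl_min_shift (k : Int) : ∀ (t : List Int) (x : Int),
    List.foldl min (k + x) (t.map (fun y => k + y)) = k + List.foldl min x t := by
  intro t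
  induction t with
  | nil => simp
  | cons z r ih =>
    intro x
    simp only [List.map_cons, List.foldl_cons, min_add_add_left]
    exact ih (min x z)

theorem pv_min_shift (k : Int) {l : List Int} (h : l ≠ []) :
    pvMinL (l.map (fun x => k + x)) = k + pvMinL l := by
  cases l with
  | nil => exact absurd rfl h
  | cons x t =>
    simp only [pvMinL, List.map_cons, PySem.List.min?_id_cons, Option.getD_some]
    exact pv_foldl_min_shift k t x

theorem pv_min_spec {l : List Int} (h : l ≠ []) :
    pvMinL l ∈ l ∧ ∀ y ∈ l, pvMinL l ≤ y := by
  cases l with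
  | nil => exact absurd rfl h
  | cons x t =>
    have hm : PySem.List.min? (x :: t) (fun y => y) = some (List.foldl min x t) :=
      PySem.List.min?_id_cons x t
    have he : pvMinL (x :: t) = List.foldl min x t := by simp [pvMinL, hm]
    exact ⟨he ▸ PySem.List.min?_mem hm, fun y hy => he ▸ PySem.List.min?_isMin hm y hy⟩

theorem pv_hits_bounds (t : List Char) : ∀ x ∈ pvHitsL t, 0 ≤ x ∧ x < (t.length : Int) := by
  intro x hx
  simp only [pvHitsL, List.mem_filter, List.mem_cons, List.not_mem_nil, or_false] at hx
  obtain ⟨hmem, hne⟩ := hx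
  have hne' : x ≠ -1 := by simpa using hne
  rcases hmem with h | h | h
  · exact h ▸ pv_find_lt (by decide) (h ▸ hne')
  · exact h ▸ pv_find_lt (by decide) (h ▸ hne')
  · have := pv_find_lt (t := PySem.Chars.lower t) (sub := "assert".toList) (by decide) (h ▸ hne')
    simpa [PySem.Chars.lower, h] using this

theorem pv_hits_sep_of_no_trig (a b : List Char) (ha : pvTrigL a = false) :
    pvHitsL (a ++ '\n' :: b) =
      (pvHitsL b).map (fun x => ((a.length : Int) + 1) + x) := by
  obtain ⟨hF, hE, hA⟩ := (pv_trig_false_iff a).mp ha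
  have eF := pv_find_sep (c := '\n') (sub := "FAILED".toList) (by decide) (by decide) a b
  have eE := pv_find_sep (c := '\n') (sub := "ERROR".toList) (by decide) (by decide) a b
  have eA := pv_find_sep (c := '\n') (sub := "assert".toList) (by decide) (by decide)
    (PySem.Chars.lower a) (PySem.Chars.lower b)
  rw [hF] at eF; rw [hE] at eE; rw [hA] at eA
  simp only [ne_eq, not_true_eq_false, if_false] at eF eE eA
  have hlen : ((PySem.Chars.lower a).length : Int) = (a.length : Int) := by
    simp [PySem.Chars.lower]
  show ([PySem.Chars.find (a ++ '\n' :: b) "FAILED".toList,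
        PySem.Chars.find (a ++ '\n' :: b) "ERROR".toList,
        PySem.Chars.find (PySem.Chars.lower (a ++ '\n' :: b)) "assert".toList].filter (· != -1)) = _
  rw [pv_lower_sep, eF, eE, eA, hlen]
  have := pv_filter_shift ((a.length : Int) + 1) (by omega)
    [PySem.Chars.find b "FAILED".toList, PySem.Chars.find b "ERROR".toList,
     PySem.Chars.find (PySem.Chars.lower b) "assert".toList]
    (by
      intro x hx
      simp only [List.mem_cons, List.not_mem_nil, or_false] at hx
      rcases hx with h | h | h <;> exact h ▸ PySem.Chars.neg_one_le_find _ _)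
  simpa [pvHitsL] using this

theorem pv_hits_first_line (a b : List Char) (ha : pvTrigL a = true) :
    ∃ x ∈ pvHitsL (a ++ '\n' :: b), 0 ≤ x ∧ x < (a.length : Int) := by
  have eF := pv_find_sep (c := '\n') (sub := "FAILED".toList) (by decide) (by decide) a b
  have eE := pv_find_sep (c := '\n') (sub := "ERROR".toList) (by decide) (by decide) a b
  have eA := pv_find_sep (c := '\n') (sub := "assert".toList) (by decide) (by decide)
    (PySem.Chars.lower a) (PySem.Chars.lower b)
  simp only [pvTrigL, Bool.or_eq_true, PySem.Chars.isIn, bne_iff_ne, ne_eq] at ha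
  rcases ha with (h | h) | h
  · have hv : PySem.Chars.find (a ++ '\n' :: b) "FAILED".toList
        = PySem.Chars.find a "FAILED".toList := by rw [eF, if_pos h]
    refine ⟨PySem.Chars.find (a ++ '\n' :: b) "FAILED".toList, ?_, ?_⟩
    · simp only [pvHitsL, List.mem_filter, List.mem_cons]
      refine ⟨by simp, by rw [hv]; simpa using h⟩
    · rw [hv]; exact pv_find_lt (by decide) h
  · have hv : PySem.Chars.find (a ++ '\n' :: b) "ERROR".toList
        = PySem.Chars.find a "ERROR".toList := by rw [eE, if_pos h]
    refine ⟨PySem.Chars.find (a ++ '\n' :: b) "ERROR".toList, ?_, ?_⟩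
    · simp only [pvHitsL, List.mem_filter, List.mem_cons]
      refine ⟨by simp, by rw [hv]; simpa using h⟩
    · rw [hv]; exact pv_find_lt (by decide) h
  · have hv : PySem.Chars.find (PySem.Chars.lower (a ++ '\n' :: b)) "assert".toList
        = PySem.Chars.find (PySem.Chars.lower a) "assert".toList := by
      rw [pv_lower_sep, eA, if_pos h]
    refine ⟨PySem.Chars.find (PySem.Chars.lower (a ++ '\n' :: b)) "assert".toList, ?_, ?_⟩
    · simp only [pvHitsL, List.mem_filter, List.mem_cons]
      refine ⟨by simp, by rw [hv]; simpa using h⟩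
    · rw [hv]
      have := pv_find_lt (t := PySem.Chars.lower a) (sub := "assert".toList) (by decide) h
      simpa [PySem.Chars.lower] using this
theorem pv_dropWhile_head (q : Char → Bool) : ∀ (l : List Char) {y : Char} {r : List Char},
    l.dropWhile q = y :: r → q y = false := by
  intro l
  induction l with
  | nil => intro y r h; simp [List.dropWhile] at h
  | cons x xs ih =>
    intro y r h
    rw [List.dropWhile_cons] at h
    by_cases hx : q x
    · rw [if_pos hx] at h; exact ih h
    · rw [if_neg hx] at h
      injection h with h1 h2
      rw [← h1]
      simpa using hx

theorem pv_crux : ∀ n : Nat, ∀ t : List Char, t.length ≤ n →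
    ((pvHitsL t = [] → (pvSplit '\n' t).findIdx? pvTrigL = none) ∧
     (pvHitsL t ≠ [] → ∃ i, (pvSplit '\n' t).findIdx? pvTrigL = some i ∧
        pvSplit '\n' (t.drop (pvLastIdx '\n' (t.take (pvMinL (pvHitsL t)).toNat) + 1).toNat)
          = (pvSplit '\n' t).drop i)) := by
  intro n
  induction n with
  | zero =>
    intro t ht
    have : t = [] := List.length_eq_zero_iff.mp (by omega)
    subst this
    constructor
    · intro _
      show List.findIdx? pvTrigL [[]] = none
      have : pvTrigL [] = false := by decide
      simp [List.findIdx?_cons, this]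
    · intro h
      exact absurd (by decide) h
  | succ n ih =>
    intro t ht
    by_cases hmem : '\n' ∈ t
    · obtain ⟨a, b, hsplit_t, hna⟩ : ∃ a b, t = a ++ '\n' :: b ∧ '\n' ∉ a := by
        have hd : t.dropWhile (fun x => x != '\n') ≠ [] := by
          rw [ne_eq, List.dropWhile_eq_nil_iff]
          intro hall
          have := hall '\n' hmem
          simp at this
        cases hcase : t.dropWhile (fun x => x != '\n') with
        | nil => exact absurd hcase hd
        | cons h0 b =>
          have hh : h0 = '\n' := by
            have := pv_dropWhile_head (fun x => x != '\n') t hcase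
            simpa using this
          refine ⟨t.takeWhile (fun x => x != '\n'), b, ?_, ?_⟩
          · rw [hh] at hcase
            rw [← hcase]
            exact (List.takeWhile_append_dropWhile).symm
          · intro hmem'
            have := List.mem_takeWhile_imp hmem'
            simp at this
      subst hsplit_t
      have hblen : b.length ≤ n := by simp at ht; omega
      have hps : pvSplit '\n' (a ++ '\n' :: b) = a :: pvSplit '\n' b := pvSplit_sep hna b
      by_cases htr : pvTrigL a
      · have hfl := pv_hits_first_line a b htr
        obtain ⟨x, hxmem, hx0, hxlt⟩ := hfl
        have hne : pvHitsL (a ++ '\n' :: b) ≠ [] := fun hnil => by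
          rw [hnil] at hxmem; exact absurd hxmem (List.not_mem_nil)
        constructor
        · intro hnil; exact absurd hnil hne
        · intro _
          refine ⟨0, by rw [hps, List.findIdx?_cons, if_pos htr], ?_⟩
          obtain ⟨hminmem, hminle⟩ := pv_min_spec hne
          set m := pvMinL (pvHitsL (a ++ '\n' :: b)) with hm
          have hmin0 : 0 ≤ m := (pv_hits_bounds _ _ hminmem).1
          have hminlt : m < (a.length : Int) := lt_of_le_of_lt (hminle x hxmem) hxlt
          have htake : (a ++ '\n' :: b).take m.toNat = a.take m.toNat := by
            rw [List.take_append]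
            have h1 : m.toNat - a.length = 0 := by omega
            rw [h1]
            simp
          have hlast : pvLastIdx '\n' ((a ++ '\n' :: b).take m.toNat) = -1 := by
            rw [htake]
            exact pv_lastIdx_neg (fun hmem' => hna (List.take_subset _ _ hmem'))
          rw [hlast]
          norm_num
      · have htr' : pvTrigL a = false := by simpa using htr
        have hsh : pvHitsL (a ++ '\n' :: b) =
            (pvHitsL b).map (fun x => ((a.length : Int) + 1) + x) :=
          pv_hits_sep_of_no_trig a b htr'
        obtain ⟨ihb1, ihb2⟩ := ih b hblen
        constructor
        · intro hnil
          have hbnil : pvHitsL b = [] := by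
            rw [hsh] at hnil
            exact List.map_eq_nil_iff.mp hnil
          rw [hps, List.findIdx?_cons, if_neg (by simp [htr']), ihb1 hbnil]
          rfl
        · intro hne
          have hbne : pvHitsL b ≠ [] := fun hnil => hne (by rw [hsh, hnil]; rfl)
          obtain ⟨i', hfi, hdr⟩ := ihb2 hbne
          refine ⟨i' + 1, by rw [hps, List.findIdx?_cons, if_neg (by simp [htr']), hfi]; rfl, ?_⟩
          set p' := pvMinL (pvHitsL b) with hp'
          have hmin : pvMinL (pvHitsL (a ++ '\n' :: b)) = ((a.length : Int) + 1) + p' := by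
            rw [hsh, pv_min_shift _ hbne]
          obtain ⟨hp'mem, -⟩ := pv_min_spec hbne
          obtain ⟨hp'0, hp'lt⟩ := pv_hits_bounds b _ hp'mem
          rw [hmin]
          have htonat : (((a.length : Int) + 1) + p').toNat = a.length + 1 + p'.toNat := by omega
          have htake : (a ++ '\n' :: b).take (((a.length : Int) + 1) + p').toNat =
              a ++ '\n' :: b.take p'.toNat := by
            rw [htonat, List.take_append, List.take_of_length_le (by omega)]
            have h1 : a.length + 1 + p'.toNat - a.length = p'.toNat + 1 := by omega
            rw [h1, List.take_succ_cons]
          set lb := pvLastIdx '\n' (b.take p'.toNat) with hlb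
          have hgelb := pv_lastIdx_ge '\n' (b.take p'.toNat)
          have hlast : pvLastIdx '\n' ((a ++ '\n' :: b).take (((a.length : Int) + 1) + p').toNat) =
              if lb ≠ -1 then (a.length : Int) + 1 + lb else (a.length : Int) := by
            rw [htake]; exact pv_lastIdx_sep '\n' a (b.take p'.toNat)
          have hstart : (pvLastIdx '\n' ((a ++ '\n' :: b).take (((a.length : Int) + 1) + p').toNat)
              + 1).toNat = a.length + 1 + (lb + 1).toNat := by
            rw [hlast]
            by_cases hlbne : lb = -1
            · simp [hlbne]
            · rw [if_pos hlbne]; omega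
          have hdrop : (a ++ '\n' :: b).drop (pvLastIdx '\n'
              ((a ++ '\n' :: b).take (((a.length : Int) + 1) + p').toNat) + 1).toNat =
              b.drop (lb + 1).toNat := by
            rw [hstart, List.drop_append, List.drop_eq_nil_of_le (by omega)]
            have h1 : a.length + 1 + (lb + 1).toNat - a.length = (lb + 1).toNat + 1 := by omega
            rw [h1, List.drop_succ_cons, List.nil_append]
          rw [hdrop, hps]
          show pvSplit '\n' (b.drop (lb + 1).toNat) = (pvSplit '\n' b).drop i'
          rw [hlb]
          exact hdr
    · have hps : pvSplit '\n' t = [t] := pvSplit_no_sep hmem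
      constructor
      · intro hnil
        have htf : pvTrigL t = false := (pv_hits_nil_iff_trig t).mp hnil
        rw [hps, List.findIdx?_cons, if_neg (by simp [htf])]
        rfl
      · intro hne
        have htt : pvTrigL t = true := by
          by_contra hh
          exact hne ((pv_hits_nil_iff_trig t).mpr (by simpa using hh))
        refine ⟨0, by rw [hps, List.findIdx?_cons, if_pos htt], ?_⟩
        obtain ⟨hminmem, -⟩ := pv_min_spec hne
        obtain ⟨hmin0, hminlt⟩ := pv_hits_bounds t _ hminmem
        have hlast : pvLastIdx '\n' (t.take (pvMinL (pvHitsL t)).toNat) = -1 :=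
          pv_lastIdx_neg (fun hmem' => hmem (List.take_subset _ _ hmem'))
        rw [hlast]
        norm_num
-- ===== A-side characterization: the capture-flag loop is "first triggering line, then 51 lines" =====

-- once capture is true, A appends every remaining line until the buffer holds 51 lines
theorem pvGoA_capture (ls : List String) : ∀ (acc : List String), acc.length ≤ 50 →
    pvGoA ls acc true = acc ++ ls.take (51 - acc.length) := by
  induction ls with
  | nil => intro acc _; simp [pvGoA]
  | cons l rest ih =>
    intro acc h
    by_cases h50 : acc.length = 50
    · have hb : (acc ++ [l]).length > 50 := by simp [h50]
      simp only [pvGoA, if_pos hb, ite_self]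
      have : 51 - acc.length = 1 := by omega
      simp [this]
    · have hlt : acc.length < 50 := lt_of_le_of_ne h h50
      have hb : ¬ (acc ++ [l]).length > 50 := by simp; omega
      simp only [pvGoA, if_neg hb, ite_self]
      rw [ih (acc ++ [l]) (by simp; omega)]
      have h1 : 51 - acc.length = (51 - (acc ++ [l]).length) + 1 := by simp; omega
      simp [h1, List.take_succ_cons]

-- A's loop result characterised by the index of the first triggering line
theorem pvGoA_eq_findIdx (ls : List String) :
    pvGoA ls [] false =
      match ls.findIdx? pvTrigger with
      | none => []
      | some i => (ls.drop i).take 51 := by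
  induction ls with
  | nil => simp [pvGoA]
  | cons l rest ih =>
    by_cases ht : pvTrigger l
    · simp only [pvGoA, ht, List.findIdx?_cons]
      have hb : ¬ ([] ++ [l] : List String).length > 50 := by simp
      simp only [if_true, if_neg hb]
      rw [pvGoA_capture rest ([] ++ [l]) (by simp)]
      simp [List.take_succ_cons]
    · simp only [pvGoA, ht, List.findIdx?_cons]
      simp only [Bool.false_eq_true, if_false]
      rw [ih]
      cases h : rest.findIdx? pvTrigger <;> simp

theorem pv_findIdx?_lt_length {α : Type} {p : α → Bool} {ls : List α} {i : Nat}
    (h : ls.findIdx? p = some i) : i < ls.length := by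
  obtain ⟨hlt, -⟩ := List.findIdx?_eq_some_iff_getElem.mp h
  exact hlt

-- ===== bridges between the String-level ports and the List Char lemmas =====

theorem pv_trigger_toList (s : String) : pvTrigger s = pvTrigL s.toList := by
  simp [pvTrigger, pvTrigL, PySem.Str.isIn_eq, PySem.Str.toList_lower]

theorem pv_lines (t : String) : ∃ ls : List String, PySem.Str.split? t "\n" = some ls ∧
    ls.map String.toList = pvSplit '\n' t.toList := by
  have h := PySem.Str.split?_map t "\n"
  have h2 : PySem.Chars.split? t.toList "\n".toList = some (pvSplit '\n' t.toList) := by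
    show (if ("\n".toList : List Char).isEmpty then none
          else some (PySem.Chars.splitOn t.toList "\n".toList)) = _
    rw [if_neg (by decide), show ("\n".toList : List Char) = ['\n'] from rfl, pv_splitOn_single]
  rw [h2] at h
  rcases Option.map_eq_some_iff.mp h with ⟨ls, hls, hmap⟩
  exact ⟨ls, hls, hmap⟩

theorem pv_hits_str (t : String) :
    ([PySem.Str.find t "FAILED", PySem.Str.find t "ERROR",
      PySem.Str.find (PySem.Str.lower t) "assert"]).filter (· != -1) = pvHitsL t.toList := by
  simp [pvHitsL, PySem.Str.find_eq, PySem.Str.toList_lower]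

-- ===== VERDICT proof =====
set_option maxHeartbeats 1000000 in
theorem get_failing_test_details_spec : Claim_equal_get_failing_test_details := by
  intro t _
  unfold Spec_get_failing_test_details
  simp only [get_failing_test_details, get_failing_test_details_alt]
  obtain ⟨ls, hsplit, hmap⟩ := pv_lines t
  obtain ⟨hemp, hnemp⟩ := pv_crux t.toList.length t.toList le_rfl
  have hidx : ls.findIdx? pvTrigger = (pvSplit '\n' t.toList).findIdx? pvTrigL := by
    rw [← hmap, List.findIdx?_map,
      show pvTrigL ∘ String.toList = pvTrigger from funext fun s => (pv_trigger_toList s).symm]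
  rw [pvGoA_eq_findIdx]
  simp only [hsplit, Option.getD_some, pv_hits_str]
  by_cases h0 : pvHitsL t.toList = []
  · rw [if_pos h0, hidx, hemp h0]
    simp
  · rw [if_neg h0]
    obtain ⟨i, hfi, hdrop⟩ := hnemp h0
    have hfi' : ls.findIdx? pvTrigger = some i := by rw [hidx]; exact hfi
    simp only [hfi']
    have hilt : i < ls.length := by
      have h1 : ls.findIdx? pvTrigger = some i := by rw [hidx]; exact hfi
      exact pv_findIdx?_lt_length h1
    have hne51 : List.take 51 (List.drop i ls) ≠ [] := by
      simp only [ne_eq, List.take_eq_nil_iff, List.drop_eq_nil_iff]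
      intro hcon
      rcases hcon with h | h
      · omega
      · have hlen : (pvSplit '\n' t.toList).length = ls.length := by
          rw [← hmap, List.length_map]
        omega
    rw [if_pos hne51]
    rw [show ((PySem.List.min? (pvHitsL t.toList) fun x => x).getD 0)
          = pvMinL (pvHitsL t.toList) from rfl]
    obtain ⟨hPmem, -⟩ := pv_min_spec h0
    obtain ⟨hP0, hPlt⟩ := pv_hits_bounds t.toList _ hPmem
    have hrf : PySem.Str.rfindFrom t "\n" 0 (some (pvMinL (pvHitsL t.toList)))
        = pvLastIdx '\n' (t.toList.take (pvMinL (pvHitsL t.toList)).toNat) := by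
      rw [PySem.Str.rfindFrom_eq]
      exact pv_rfindFrom_eval _ _ _ hP0 (by omega)
    rw [hrf]
    have hge := pv_lastIdx_ge '\n' (t.toList.take (pvMinL (pvHitsL t.toList)).toNat)
    set st := pvLastIdx '\n' (t.toList.take (pvMinL (pvHitsL t.toList)).toNat) + 1 with hst
    have hst0 : (0:Int) ≤ st := by omega
    have htail : (PySem.Str.slice t (some st) none).toList = t.toList.drop st.toNat := by
      rw [PySem.Str.toList_slice, PySem.Chars.slice_eq_listSlice, PySem.List.slice_from _ hst0]
    obtain ⟨ls2, hsplit2, hmap2⟩ := pv_lines (PySem.Str.slice t (some st) none)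
    rw [hsplit2, Option.getD_some]
    have hslice51 : PySem.List.slice ls2 none (some 51) = ls2.take 51 := by
      rw [PySem.List.slice_to _ (by norm_num)]
      rfl
    rw [hslice51]
    have hmap2' : ls2.map String.toList = (ls.drop i).map String.toList := by
      rw [hmap2, htail, hst, hdrop, ← hmap, ← List.map_drop]
    have hjoin : (PySem.Str.join "\n" (List.take 51 (List.drop i ls))).toList
        = (PySem.Str.join "\n" (ls2.take 51)).toList := by
      rw [PySem.Str.toList_join, PySem.Str.toList_join]
      congr 1
      rw [List.map_take, List.map_take, hmap2']
    exact String.toList_inj.mp hjoin
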